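-- pv_equiv track=rewrite | github.com/shubhamgyd/mission_TCS | Daily_Coding_problems/121_Modified_Selection_Sort.py | selection_sort_fast
-- ===== SOURCE A (Python) =====
-- def selection_sort_fast(numbers2):
--     swapsAndComparisions=[]
--     n=len(numbers2)
--     # Start from the end of list
--     # it says that element in range i to end of list are sorted
--     for i in range(n-1,0,-1):
--         # set current element as maximumNumber
--         mxNumber=numbers2[i]
--         # get index numer
--         mxInd=i
--         # count of swaps
--         swaps=0
--         # count of comparasitions
--         comparisons=0
--
--         operations=[]
--         # Iterate in non sorted array
--         for j in range(0,i):
--             # if jth element is greater than mxNumber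
--             if numbers2[j]>mxNumber:
--                 # update mxNumber
--                 mxNumber=numbers2[j]
--                 # set mxIndex
--                 mxInd=j
--             # Increment the comparasitions
--             comparisons=comparisons+1
--
--         # if we get the bigger number than the ith number
--         if mxNumber>numbers2[i]:
--             # Then swap them
--             tmp=numbers2[i]
--             numbers2[i]=numbers2[mxInd]
--             numbers2[mxInd]=tmp
--             # Increment the swaps
--             swaps=swaps+1
--         # Append comparsitions and swaps in list
--         operations.append(comparisons)
--         operations.append(swaps)
--         # append operations list in swapsAndComparasitions list
--         swapsAndComparisions.append(operations)
--     # return list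
--     return swapsAndComparisions
-- ===== SOURCE B (Python) =====
-- def selection_sort_fast(numbers2):
--     # B: iterate on a shrinking copy of the list: split off the last element,
--     # compare it with max(prefix), patch the prefix, continue on the prefix.
--     arr, out = list(numbers2), []
--     while len(arr) > 1:
--         pre, last = arr[:-1], arr[-1]
--         m = max(pre)
--         if m > last:
--             pre[pre.index(m)] = last
--             out.append([len(pre), 1])
--         else:
--             out.append([len(pre), 0])
--         arr = pre
--     return out
-- ===== Notes on version B (the rewrite author's own statement) =====
-- stated objective: alternative
-- what changed: B replaces A's index-driven outer loop with a hand-written running-max inner scan and in-place swaps by a worklist loop on a shrinking copy of the list: each round splits off the last element, compares it with max(prefix) via max()/list.index(), patches the prefix and continues on it; A mutates its argument in place, B does not (return values agree).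
import Mathlib
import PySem

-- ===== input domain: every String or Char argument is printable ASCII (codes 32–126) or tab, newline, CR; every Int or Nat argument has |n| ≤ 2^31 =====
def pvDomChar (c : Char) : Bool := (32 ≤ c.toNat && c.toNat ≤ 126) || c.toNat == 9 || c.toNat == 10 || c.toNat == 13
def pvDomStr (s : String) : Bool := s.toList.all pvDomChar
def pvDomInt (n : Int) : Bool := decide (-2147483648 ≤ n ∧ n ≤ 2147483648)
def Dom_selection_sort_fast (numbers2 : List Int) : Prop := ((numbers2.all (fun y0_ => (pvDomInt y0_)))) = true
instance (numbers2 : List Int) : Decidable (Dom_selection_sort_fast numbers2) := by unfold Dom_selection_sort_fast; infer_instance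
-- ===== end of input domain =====

-- B replaces A's index loop + running-max inner scan + in-place swaps by a worklist loop
-- on a shrinking copy of the list (objective: alternative). A mutates numbers2 in
-- place, B does not; the theorem is about the return value only.

-- ===== PORT A =====
-- loop body of A's outer 'for i in range(n-1, 0, -1)': state = (numbers2, swapsAndComparisions)
def pvStepA (st : List Int × List (List Int)) (i : Int) : List Int × List (List Int) :=
  let arr := st.1
  -- inner 'for j in range(0, i)': state = ((mxNumber, mxInd), comparisons)
  let inner := (PySem.List.pyRange 0 i 1).foldl
    (fun (s : (Int × Int) × Int) j =>
      ((if PySem.List.pyGetD arr j 0 > s.1.1 then (PySem.List.pyGetD arr j 0, j) else s.1), s.2 + 1))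
    ((PySem.List.pyGetD arr i 0, i), 0)
  let mxNumber := inner.1.1
  let mxInd := inner.1.2
  let comparisons := inner.2
  if mxNumber > PySem.List.pyGetD arr i 0 then
    let tmp := PySem.List.pyGetD arr i 0
    let arr1 := PySem.List.pySetD arr i (PySem.List.pyGetD arr mxInd 0)
    let arr2 := PySem.List.pySetD arr1 mxInd tmp
    (arr2, st.2 ++ [[comparisons, 1]])
  else
    (arr, st.2 ++ [[comparisons, 0]])

def selection_sort_fast (numbers2 : List Int) : List (List Int) :=
  -- n = len(numbers2)
  ((PySem.List.pyRange ((numbers2.length : Int) - 1) 0 (-1)).foldl pvStepA (numbers2, [])).2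

-- ===== PORT B =====
-- B's 'while len(arr) > 1' loop, tail recursion on the worklist arr with accumulator out.
-- arr[:-1] / arr[-1] are dropLast / getLastD (arr is nonempty past the guard).
def pvGoB (arr : List Int) (out : List (List Int)) : List (List Int) :=
  if arr.length ≤ 1 then out
  else
    let pre := arr.dropLast
    let last := arr.getLastD 0
    let m := PySem.List.maxD pre id 0          -- max(pre); pre nonempty here
    if m > last then
      pvGoB (pre.set ((PySem.List.index? pre m).getD 0) last) (out ++ [[(pre.length : Int), 1]])
    else
      pvGoB pre (out ++ [[(pre.length : Int), 0]])
termination_by arr.length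
decreasing_by
  · simp [List.length_dropLast]; omega
  · simp [List.length_dropLast]; omega

def selection_sort_fast_alt (numbers2 : List Int) : List (List Int) :=
  pvGoB numbers2 []

-- ===== PRECONDITION & SPEC =====
def Spec_selection_sort_fast (numbers2 : List Int) (out : List (List Int)) : Prop := out = selection_sort_fast_alt numbers2
instance (numbers2 : List Int) (out : List (List Int)) : Decidable (Spec_selection_sort_fast numbers2 out) := by unfold Spec_selection_sort_fast; infer_instance

-- ===== CLAIM (what is proved, stated in full; the proofs are below) =====
def Claim_equal_selection_sort_fast : Prop := ∀ (numbers2 : List Int), Dom_selection_sort_fast numbers2 → Spec_selection_sort_fast numbers2 (selection_sort_fast numbers2)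

-- ===== LEMMAS AND PROOFS =====

lemma pv_max?_append_singleton (p : List Int) (x : Int) :
    PySem.List.max? (p ++ [x]) id =
      some ((PySem.List.max? p id).elim x (fun m => if m < x then x else m)) := by
  rcases hp : PySem.List.max? p id with _ | m
  · unfold PySem.List.max? at hp ⊢
    rw [List.foldl_append, hp]
    simp only [List.foldl_cons, List.foldl_nil, Option.elim, id]
  · unfold PySem.List.max? at hp ⊢
    rw [List.foldl_append, hp]
    simp only [List.foldl_cons, List.foldl_nil, Option.elim, id]
    by_cases hmx : m < x <;> simp [hmx]

-- characterisation of A's inner running-max scan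
lemma pv_inner_char (arr : List Int) (v iInd : Int) (k : Nat) (hk : k ≤ arr.length) :
    (PySem.List.pyRange 0 (k : Int) 1).foldl
      (fun (s : Int × Int) j =>
        if PySem.List.pyGetD arr j 0 > s.1 then (PySem.List.pyGetD arr j 0, j) else s)
      (v, iInd) =
    (PySem.List.max? (arr.take k) id).elim (v, iInd)
      (fun m => if v < m then (m, (((PySem.List.index? (arr.take k) m).getD 0 : Nat) : Int)) else (v, iInd)) := by
  induction k with
  | zero =>
    rw [PySem.List.pyRange_one_eq_nil (by omega)]
    simp [PySem.List.max?]
  | succ k ih =>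
    have hk' : k ≤ arr.length := by omega
    have hklen : k < arr.length := by omega
    have hcast : ((k + 1 : Nat) : Int) = (k : Int) + 1 := by push_cast; ring
    rw [hcast, PySem.List.pyRange_one_succ_right (by positivity), List.foldl_append,
      ih hk', List.foldl_cons, List.foldl_nil]
    have htake : arr.take (k + 1) = arr.take k ++ [arr[k]] := by
      rw [List.take_add_one, List.getElem?_eq_getElem hklen]
      rfl
    have hget : PySem.List.pyGetD arr (k : Int) 0 = arr[k] := by
      rw [PySem.List.pyGetD_natCast, List.getD_eq_getElem _ _ hklen]
    rw [htake, pv_max?_append_singleton]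
    rcases hp : PySem.List.max? (arr.take k) id with _ | m
    · have hpe : arr.take k = [] := (PySem.List.max?_eq_none_iff _ _).mp hp
      have hk0 : k = 0 := by
        rcases List.take_eq_nil_iff.mp hpe with h | h
        · exact h
        · subst h; simp at hklen
      subst hk0
      simp only [hpe, Option.elim, hget, List.nil_append]
      by_cases hvx : v < arr[0] <;>
        simp [hvx, gt_iff_lt]
    · have hmem : m ∈ arr.take k := PySem.List.max?_mem hp
      have hmax : ∀ y ∈ arr.take k, y ≤ m := by
        intro y hy; exact PySem.List.max?_isMax hp y hy
      have hlen_take : (arr.take k).length = k := by simp [List.length_take]; omega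
      simp only [Option.elim, hget, gt_iff_lt]
      set x := arr[k] with hx
      by_cases hmx : m < x
      · have hxnotin : x ∉ arr.take k := fun hxin => absurd (hmax x hxin) (by omega)
        have hidx : PySem.List.index? (arr.take k ++ [x]) x = some (arr.take k).length :=
          PySem.List.index?_append_singleton_self _ x hxnotin
        simp only [PySem.List.index?_eq_idxOf?] at hidx
        by_cases hvm : v < m
        · simp [hvm, hmx, (show v < x by omega), PySem.List.index?_eq_idxOf?, hidx, hlen_take]
        · by_cases hvx : v < x
          · simp [hvm, hmx, hvx, PySem.List.index?_eq_idxOf?, hidx, hlen_take]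
          · simp [hvm, hmx, hvx]
      · have hidx : PySem.List.index? (arr.take k ++ [x]) m = PySem.List.index? (arr.take k) m :=
          PySem.List.index?_append_of_mem _ hmem
        simp only [PySem.List.index?_eq_idxOf?] at hidx
        by_cases hvm : v < m
        · simp [hvm, hmx, PySem.List.index?_eq_idxOf?, hidx]
        · have hvx : ¬ v < x := by omega
          simp [hvm, hmx, hvx]

lemma pv_count_char (i : Int) (hi : 0 ≤ i) :
    (PySem.List.pyRange 0 i 1).foldl (fun (c : Int) (_ : Int) => c + 1) 0 = i := by
  rw [PySem.List.foldl_add (g := fun _ => (1:Int))]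
  rw [PySem.List.sum_map_const_int]
  simp [PySem.List.length_pyRange_one, hi]

-- dropLast / getLastD of a (k+1)-prefix
lemma pv_take_succ_dropLast (arr : List Int) (k : Nat) (hk : k < arr.length) :
    (arr.take (k + 1)).dropLast = arr.take k ∧ (arr.take (k + 1)).getLastD 0 = arr[k] := by
  have htake : arr.take (k + 1) = arr.take k ++ [arr[k]] := by
    rw [List.take_add_one, List.getElem?_eq_getElem hk]; rfl
  constructor
  · rw [htake, List.dropLast_concat]
  · rw [htake, List.getLastD_concat]

-- one step of A's fold, expressed through one unfolding of pvGoB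
lemma pv_step_char (arr : List Int) (acc : List (List Int)) (i : Int)
    (h0 : 0 < i) (h1 : i < arr.length) :
    ∃ (arr' : List Int) (e : List Int), arr'.length = arr.length ∧
      pvStepA (arr, acc) i = (arr', acc ++ [e]) ∧
      ∀ out, pvGoB (arr.take (i.toNat + 1)) out = pvGoB (arr'.take i.toNat) (out ++ [e]) := by
  obtain ⟨k, rfl⟩ : ∃ k : Nat, i = ((k : Nat) : Int) := ⟨i.toNat, by omega⟩
  simp only [Int.toNat_natCast] at *
  have hknat : k ≤ arr.length := by omega
  have hpos : 0 < k := by omega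
  have hlt : k < arr.length := by omega
  obtain ⟨hdrop, hlast⟩ := pv_take_succ_dropLast arr k hlt
  have hguard : ¬ (arr.take (k + 1)).length ≤ 1 := by
    simp [List.length_take]; omega
  have hlent : (arr.take k).length = k := by simp [List.length_take]; omega
  have hv : PySem.List.pyGetD arr ((k : Nat) : Int) 0 = arr[k] := by
    rw [PySem.List.pyGetD_natCast, List.getD_eq_getElem _ _ hlt]
  rcases hp : PySem.List.max? (arr.take k) id with _ | m
  · exfalso
    have hpe := (PySem.List.max?_eq_none_iff _ _).mp hp
    rw [hpe] at hlent; simp at hlent; omega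
  have hmaxD : PySem.List.maxD (arr.take k) id 0 = m := by
    simp [PySem.List.maxD, hp]
  have hgo1 : ∀ out, pvGoB (arr.take (k + 1)) out =
      if m > arr[k] then
        pvGoB ((arr.take k).set ((PySem.List.index? (arr.take k) m).getD 0) arr[k])
          (out ++ [[((arr.take k).length : Int), 1]])
      else
        pvGoB (arr.take k) (out ++ [[((arr.take k).length : Int), 0]]) := by
    intro out
    rw [pvGoB, if_neg hguard]
    simp only [hdrop, hlast, hmaxD]
  have hstepA : pvStepA (arr, acc) ((k : Nat) : Int) =
      if m > arr[k] then
        ((arr.set k m).set ((PySem.List.index? (arr.take k) m).getD 0) arr[k],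
          acc ++ [[((k : Nat) : Int), 1]])
      else
        (arr, acc ++ [[((k : Nat) : Int), 0]]) := by
    unfold pvStepA
    dsimp only
    rw [PySem.List.foldl_prod_mk
          (f := fun (p : Int × Int) j => if PySem.List.pyGetD arr j 0 > p.1 then (PySem.List.pyGetD arr j 0, j) else p)
          (g := fun (c : Int) _ => c + 1)]
    rw [pv_inner_char arr _ _ k hknat, pv_count_char _ (by positivity)]
    rw [hp]
    simp only [Option.elim, hv, gt_iff_lt]
    by_cases hvm : arr[k] < m
    · obtain ⟨k0, hk0⟩ : ∃ k0, PySem.List.index? (arr.take k) m = some k0 := by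
        rcases h : PySem.List.index? (arr.take k) m with _ | k0
        · exact absurd ((PySem.List.index?_eq_none_iff _ _).mp h) (by simp [PySem.List.max?_mem hp])
        · exact ⟨k0, rfl⟩
      obtain ⟨hk0lt, hk0get, -⟩ := PySem.List.getElem_of_index?_eq_some hk0
      have hk0len : k0 < k := by rw [hlent] at hk0lt; exact hk0lt
      have harr_k0 : arr[k0]'(by omega) = m := by
        rw [← hk0get]; exact (List.getElem_take).symm
      have hgetk0 : PySem.List.pyGetD arr ((k0 : Nat) : Int) 0 = m := by
        rw [PySem.List.pyGetD_natCast, List.getD_eq_getElem _ _ (by omega)]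
        exact harr_k0
      simp only [hk0, Option.getD_some, if_pos hvm]
      rw [hgetk0]
      simp only [PySem.List.pySetD_natCast]
    · simp only [if_neg hvm]
      rw [if_neg (show ¬ arr[k] < arr[k] by omega)]
  by_cases hvm : arr[k] < m
  · refine ⟨(arr.set k m).set ((PySem.List.index? (arr.take k) m).getD 0) arr[k],
      [((k : Nat) : Int), 1], by simp, ?_, ?_⟩
    · rw [hstepA, if_pos hvm]
    · intro out
      rw [hgo1 out, if_pos hvm]
      have htk : ((arr.set k m).set ((PySem.List.index? (arr.take k) m).getD 0)
            arr[k]).take k =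
          (arr.take k).set ((PySem.List.index? (arr.take k) m).getD 0) arr[k] := by
        rw [List.take_set, List.take_set_of_le (le_refl k)]
      rw [htk, hlent]
  · refine ⟨arr, [((k : Nat) : Int), 0], rfl, ?_, ?_⟩
    · rw [hstepA, if_neg hvm]
    · intro out
      rw [hgo1 out, if_neg hvm, hlent]

lemma pv_outer (k : Nat) : ∀ (i : Int) (arr : List Int) (acc : List (List Int)),
    i.toNat = k → i < arr.length →
    ((PySem.List.pyRange i 0 (-1)).foldl pvStepA (arr, acc)).2 = pvGoB (arr.take (i.toNat + 1)) acc := by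
  induction k with
  | zero =>
    intro i arr acc hk _
    rw [PySem.List.pyRange_neg_one_eq_nil (by omega)]
    have : (arr.take (i.toNat + 1)).length ≤ 1 := by
      rw [hk]; simp [List.length_take]
    rw [pvGoB, if_pos this]
    rfl
  | succ k ih =>
    intro i arr acc hk hlen
    have h0 : 0 < i := by omega
    rw [PySem.List.pyRange_neg_one_cons h0]
    simp only [List.foldl_cons]
    obtain ⟨arr', e, hlen', hstep, hgo⟩ := pv_step_char arr acc i h0 hlen
    rw [hstep, ih (i - 1) arr' _ (by omega) (by omega), hgo acc]
    have : (i - 1).toNat + 1 = i.toNat := by omega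
    rw [this]

-- ===== VERDICT (by name: the statement is the Claim_ definition above) =====
theorem selection_sort_fast_spec : Claim_equal_selection_sort_fast := by
  intro numbers2 _
  unfold Spec_selection_sort_fast selection_sort_fast selection_sort_fast_alt
  rcases hn : numbers2 with _ | ⟨x, rest⟩
  · rw [PySem.List.pyRange_neg_one_eq_nil (by simp)]
    rw [pvGoB]
    simp
  · rw [← hn]
    have hlen : 0 < numbers2.length := by rw [hn]; simp
    rw [pv_outer ((numbers2.length : Int) - 1).toNat ((numbers2.length : Int) - 1) numbers2 [] rfl (by omega)]
    have h2 : ((numbers2.length : Int) - 1).toNat + 1 = numbers2.length := by omega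
    rw [h2, List.take_length]
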